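-- pv_equiv track=rewrite | github.com/Pks1828/capstone_project | StockAnalysis/test.py | carryover
-- ===== SOURCE A (Python) =====
-- def carryover(signals_in, n=4):
--     i=0
--     signals = signals_in[:]
--     while i<len(signals):
--         if signals[i]!=0:
--             count = 0
--             i+=1
--             while i<len(signals) and signals[i]==0 and count<n:
--                 signals[i] = signals[i-1]
--                 count+=1
--                 i+=1
--             continue
--         i+=1
--     return signals
-- ===== SOURCE B (Python) =====
-- def carryover(signals_in, n=4):
--     out = []
--     carry = 0
--     remaining = 0
--     for x in signals_in:
--         if x != 0:
--             carry = x
--             remaining = n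
--             out.append(x)
--         elif remaining > 0:
--             remaining -= 1
--             out.append(carry)
--         else:
--             out.append(0)
--     return out
-- ===== Notes on version B (the rewrite author's own statement) =====
-- stated objective: simpler
-- what changed: Replaced A's index-jumping nested while loops that mutate a copy in place by a single for-loop over the elements that builds a fresh output list while tracking the last nonzero value and a zeros-remaining counter.
import Mathlib
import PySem

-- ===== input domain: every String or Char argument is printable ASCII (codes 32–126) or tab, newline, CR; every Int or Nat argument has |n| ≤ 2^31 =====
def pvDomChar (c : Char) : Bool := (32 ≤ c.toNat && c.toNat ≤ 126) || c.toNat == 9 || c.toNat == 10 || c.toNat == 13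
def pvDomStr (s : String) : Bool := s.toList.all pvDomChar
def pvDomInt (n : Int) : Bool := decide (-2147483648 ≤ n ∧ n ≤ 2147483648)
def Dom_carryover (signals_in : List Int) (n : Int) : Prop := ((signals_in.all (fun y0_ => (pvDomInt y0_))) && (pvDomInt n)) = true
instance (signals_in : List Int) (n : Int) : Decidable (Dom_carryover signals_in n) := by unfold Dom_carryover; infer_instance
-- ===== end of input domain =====

-- B rebuilds the output with one for-loop over the elements, tracking (carry, remaining),
-- instead of A's nested while loops that jump an index and mutate a copy in place (objective: simpler).

-- ===== PORT A =====
-- the inner while loop: fills zeros with signals[i-1] while i<len ∧ signals[i]==0 ∧ count<n;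
-- returns the mutated list and the index where it stopped.  All Python index accesses are in
-- range (guards ensure 0 ≤ i-1 < i < len), so List.getD/List.set are exact; fuel ≥ len - i
-- only makes the loop total and is always sufficient at the call site.
def innerA (fuel : Nat) (signals : List Int) (i : Nat) (count n : Int) : List Int × Nat :=
  match fuel with
  | 0 => (signals, i)
  | fuel + 1 =>
    if i < signals.length ∧ signals.getD i 0 = 0 ∧ count < n then
      innerA fuel (signals.set i (signals.getD (i - 1) 0)) (i + 1) (count + 1) n
    else (signals, i)

-- the outer while loop (fuel ≥ len - i, always sufficient at the call site)
def outerA (fuel : Nat) (signals : List Int) (i : Nat) (n : Int) : List Int :=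
  match fuel with
  | 0 => signals
  | fuel + 1 =>
    if i < signals.length then
      if signals.getD i 0 ≠ 0 then
        outerA fuel (innerA signals.length signals (i + 1) 0 n).1
          (innerA signals.length signals (i + 1) 0 n).2 n
      else outerA fuel signals (i + 1) n
    else signals

-- signals = signals_in[:] copies; the copy is what the loops run on and what is returned
def carryover (signals_in : List Int) (n : Int) : List Int :=
  outerA signals_in.length signals_in 0 n

-- ===== PORT B =====
-- the body of B's for-loop, as a named step function over state (out, carry, remaining)
def stepB (n : Int) (acc : List Int × Int × Int) (x : Int) : List Int × Int × Int :=
  if x ≠ 0 then (acc.1 ++ [x], x, n)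
  else if acc.2.2 > 0 then (acc.1 ++ [acc.2.1], acc.2.1, acc.2.2 - 1)
  else (acc.1 ++ [0], acc.2.1, acc.2.2)

-- single pass building the output list
def carryover_alt (signals_in : List Int) (n : Int) : List Int :=
  (signals_in.foldl (stepB n) ([], 0, 0)).1

-- ===== PRECONDITION & SPEC =====
def Spec_carryover (signals_in : List Int) (n : Int) (out : List Int) : Prop := out = carryover_alt signals_in n
instance (signals_in : List Int) (n : Int) (out : List Int) : Decidable (Spec_carryover signals_in n out) := by unfold Spec_carryover; infer_instance

-- ===== CLAIM (what is proved, stated in full; the proofs are below) =====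
def Claim_equal_carryover : Prop := ∀ (signals_in : List Int) (n : Int), Dom_carryover signals_in n → Spec_carryover signals_in n (carryover signals_in n)

-- ===== LEMMAS AND PROOFS =====

-- functional description of B's state machine, building with cons
def gB (n : Int) : List Int → Int → Int → List Int
  | [], _, _ => []
  | x :: xs, c, r =>
    if x ≠ 0 then x :: gB n xs x n
    else if r > 0 then c :: gB n xs c (r - 1)
    else 0 :: gB n xs c r

theorem gB_cons_ne (n x : Int) (xs : List Int) (c r : Int) (h : x ≠ 0) :
    gB n (x :: xs) c r = x :: gB n xs x n := by rw [gB, if_pos h]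

theorem gB_cons_pos (n : Int) (xs : List Int) (c r : Int) (h : r > 0) :
    gB n ((0 : Int) :: xs) c r = c :: gB n xs c (r - 1) := by
  rw [gB, if_neg (by simp), if_pos h]

theorem gB_cons_nonpos (n : Int) (xs : List Int) (c r : Int) (h : ¬ r > 0) :
    gB n ((0 : Int) :: xs) c r = 0 :: gB n xs c r := by
  rw [gB, if_neg (by simp), if_neg h]

theorem foldB_eq_gB (n : Int) (xs : List Int) :
    ∀ (out : List Int) (c r : Int),
      (xs.foldl (stepB n) (out, c, r)).1 = out ++ gB n xs c r := by
  induction xs with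
  | nil => intro out c r; simp [gB]
  | cons x xs ih =>
    intro out c r
    rw [List.foldl_cons]
    by_cases hx : x ≠ 0
    · rw [show stepB n (out, c, r) x = (out ++ [x], x, n) from by rw [stepB, if_pos hx],
        ih, gB_cons_ne n x xs c r hx]
      simp
    · push Not at hx
      subst hx
      by_cases hr : r > 0
      · rw [show stepB n (out, c, r) 0 = (out ++ [c], c, r - 1) from by
          rw [stepB, if_neg (by simp), if_pos hr], ih, gB_cons_pos n xs c r hr]
        simp
      · rw [show stepB n (out, c, r) 0 = (out ++ [0], c, r) from by
          rw [stepB, if_neg (by simp), if_neg hr], ih, gB_cons_nonpos n xs c r hr]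
        simp

theorem gB_nonpos (n : Int) (xs : List Int) :
    ∀ (c c' r r' : Int), r ≤ 0 → r' ≤ 0 → gB n xs c r = gB n xs c' r' := by
  induction xs with
  | nil => intros; rfl
  | cons x xs ih =>
    intro c c' r r' hr hr'
    by_cases hx : x ≠ 0
    · rw [gB_cons_ne n x xs c r hx, gB_cons_ne n x xs c' r' hx]
    · push Not at hx
      subst hx
      rw [gB_cons_nonpos n xs c r (by omega), gB_cons_nonpos n xs c' r' (by omega),
        ih c c' r r' hr hr']

theorem take_succ_of_lt {s : List Int} {i : Nat} (h : i < s.length) :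
    s.take (i + 1) = s.take i ++ [s[i]] := by
  rw [List.take_add_one]; simp [h]

theorem set_take_succ {s : List Int} {i : Nat} (h : i < s.length) (v : Int) :
    (s.set i v).take (i + 1) = s.take i ++ [v] := by
  rw [take_succ_of_lt (by simpa using h)]
  rw [List.take_set]
  rw [List.set_eq_of_length_le (by simp)]
  simp [List.getElem_set_self]

theorem set_drop_succ {s : List Int} {i : Nat} (v : Int) :
    (s.set i v).drop (i + 1) = s.drop (i + 1) := by
  rw [List.drop_set]; simp

theorem set_getD_self {s : List Int} {i : Nat} (h : i < s.length) (v : Int) :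
    (s.set i v).getD i 0 = v := by
  simp [List.getD_eq_getElem?_getD, h]

theorem drop_eq_getD_cons {s : List Int} {i : Nat} (h : i < s.length) :
    s.drop i = s.getD i 0 :: s.drop (i + 1) := by
  rw [List.drop_eq_getElem_cons h, List.getD_eq_getElem s 0 h]

theorem innerA_stop {fi : Nat} {s : List Int} {i : Nat} {c n : Int}
    (h : ¬ (i < s.length ∧ s.getD i 0 = 0 ∧ c < n)) : innerA fi s i c n = (s, i) := by
  cases fi with
  | zero => rfl
  | succ fi => rw [innerA, if_neg h]

theorem outerA_stop {f : Nat} {s : List Int} {i : Nat} {n : Int}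
    (h : ¬ i < s.length) : outerA f s i n = s := by
  cases f with
  | zero => rfl
  | succ f => rw [outerA, if_neg h]

-- the main invariant: both of A's loops expressed through gB
theorem mainPQ (n : Int) : ∀ k : Nat,
    (∀ (f : Nat) (s : List Int) (i : Nat), s.length - i = k → k ≤ f → i ≤ s.length →
       outerA f s i n = s.take i ++ gB n (s.drop i) 0 0) ∧
    (∀ (fi f : Nat) (s : List Int) (i : Nat) (c : Int), s.length - i = k → 1 ≤ i →
       i ≤ s.length → k ≤ fi → k ≤ f →
       outerA f (innerA fi s i c n).1 (innerA fi s i c n).2 n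
         = s.take i ++ gB n (s.drop i) (s.getD (i - 1) 0) (n - c)) := by
  intro k
  induction k using Nat.strong_induction_on with
  | _ k ih =>
    have hP : ∀ (f : Nat) (s : List Int) (i : Nat), s.length - i = k → k ≤ f →
        i ≤ s.length → outerA f s i n = s.take i ++ gB n (s.drop i) 0 0 := by
      intro f s i hk hf hle
      by_cases hlt : i < s.length
      · obtain ⟨f, rfl⟩ : ∃ f', f = f' + 1 := ⟨f - 1, by omega⟩
        rw [outerA, if_pos hlt]
        by_cases hz : s.getD i 0 ≠ 0
        · rw [if_pos hz]
          rw [(ih (k - 1) (by omega)).2 s.length f s (i + 1) 0 (by omega) (by omega)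
            (by omega) (by omega) (by omega)]
          rw [drop_eq_getD_cons hlt, gB_cons_ne n _ _ _ _ hz]
          rw [show (i + 1) - 1 = i from rfl]
          rw [take_succ_of_lt hlt, ← List.getD_eq_getElem s 0 hlt]
          simp
        · rw [if_neg hz]
          push Not at hz
          rw [(ih (k - 1) (by omega)).1 f s (i + 1) (by omega) (by omega) (by omega)]
          rw [drop_eq_getD_cons hlt, hz, gB_cons_nonpos n _ _ _ (by omega)]
          rw [take_succ_of_lt hlt, ← List.getD_eq_getElem s 0 hlt, hz]
          simp
      · rw [outerA_stop hlt]
        have hi : i = s.length := by omega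
        simp [hi, gB]
    refine ⟨hP, ?_⟩
    intro fi f s i c hk h1 hle hfi hf
    by_cases hcnd : i < s.length ∧ s.getD i 0 = 0 ∧ c < n
    · obtain ⟨hlt, hz, hcn⟩ := hcnd
      obtain ⟨fi, rfl⟩ : ∃ fi', fi = fi' + 1 := ⟨fi - 1, by omega⟩
      rw [innerA, if_pos ⟨hlt, hz, hcn⟩]
      rw [(ih (k - 1) (by omega)).2 fi f (s.set i (s.getD (i - 1) 0)) (i + 1) (c + 1)
        (by simp; omega) (by omega) (by simp; omega) (by omega) (by omega)]
      rw [show (i + 1) - 1 = i from rfl]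
      rw [set_take_succ hlt, set_drop_succ, set_getD_self hlt]
      rw [drop_eq_getD_cons hlt, hz, gB_cons_pos n _ _ _ (by omega)]
      rw [show n - (c + 1) = n - c - 1 by ring]
      simp
    · rw [innerA_stop hcnd]
      push Not at hcnd
      by_cases hlt : i < s.length
      · by_cases hz : s.getD i 0 = 0
        · have hcn : n ≤ c := hcnd hlt hz
          rw [hP f s i hk hf hle]
          rw [drop_eq_getD_cons hlt, hz]
          rw [gB_cons_nonpos n _ _ _ (by omega), gB_cons_nonpos n _ _ _ (by omega)]
          rw [gB_nonpos n (s.drop (i + 1)) 0 (s.getD (i - 1) 0) 0 (n - c) (by omega) (by omega)]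
        · rw [hP f s i hk hf hle]
          rw [drop_eq_getD_cons hlt]
          rw [gB_cons_ne n _ _ _ _ hz, gB_cons_ne n _ _ _ _ hz]
      · rw [outerA_stop hlt]
        have hi : i = s.length := by omega
        simp [hi, gB]

-- ===== VERDICT (by name: the statement is the Claim_ definition above) =====
theorem carryover_spec : Claim_equal_carryover := by
  intro signals_in n _
  unfold Spec_carryover carryover carryover_alt
  rw [(mainPQ n (signals_in.length - 0)).1 signals_in.length signals_in 0 rfl (by omega) (by omega)]
  rw [foldB_eq_gB n signals_in [] 0 0]
  simp
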